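-- pv_equiv track=rewrite | github.com/amykim5807/6009 | q2_practice/quiz.py | assign_cities
-- ===== SOURCE A (Python) =====
-- def assign_cities(L, N):
--     def helper(reqs, assignments, N):
--         if len(assignments) == N:
--             return assignments
--
--         for city in reqs[len(assignments)]:
--             if city not in assignments:
--                 new_assignments = assignments + [city]
--                 if helper(reqs,new_assignments,N) != None:
--                     return helper(reqs,new_assignments,N)
--         return None
--     return helper(L,[],N)
-- ===== SOURCE B (Python) =====
-- def assign_cities(L, N):
--     def combos(rows):
--         if not rows:
--             yield []
--             return
--         for city in rows[0]:
--             for tail in combos(rows[1:]):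
--                 yield [city] + tail
--     for combo in combos(L[:N]):
--         if len(set(combo)) == N:
--             return combo
--     return None
-- ===== Notes on version B (the rewrite author's own statement) =====
-- stated objective: alternative
-- what changed: B replaces A's pruned backtracking (membership check at every step, each successful recursive call re-invoked) by lazy generate-and-test: a generator enumerates the Cartesian product of the first N request rows in the same order and B returns the first tuple whose elements are all distinct; B is shorter and stateless but, lacking A's pruning, can be much slower on unsatisfiable inputs.
-- outside the precondition, e.g. on assign_cities([['a'], ['a'], ['b', 'c']], 5): A returns None, B returns None
import Mathlib
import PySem

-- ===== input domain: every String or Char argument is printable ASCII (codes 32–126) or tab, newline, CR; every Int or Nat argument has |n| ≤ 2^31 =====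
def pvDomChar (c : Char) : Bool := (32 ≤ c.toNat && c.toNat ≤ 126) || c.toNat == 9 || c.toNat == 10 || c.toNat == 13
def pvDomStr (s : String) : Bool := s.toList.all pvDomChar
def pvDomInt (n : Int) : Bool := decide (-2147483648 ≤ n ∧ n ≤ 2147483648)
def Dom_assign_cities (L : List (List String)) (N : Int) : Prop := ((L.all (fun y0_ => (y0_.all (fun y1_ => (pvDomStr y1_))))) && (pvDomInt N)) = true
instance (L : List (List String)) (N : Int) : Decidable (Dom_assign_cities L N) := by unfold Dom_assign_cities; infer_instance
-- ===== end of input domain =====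

-- B replaces A's pruned backtracking search by lazy generate-and-test over the Cartesian
-- product of the first N request rows, returning the first all-distinct tuple (objective:
-- alternative — a different algorithm, same return value on Pre_; without A's pruning B can
-- be slower on unsatisfiable inputs).
-- fuel (= L.length + 1) only makes A's recursion total; inside Pre_ it is never exhausted.

-- ===== PORT A =====
mutual
def pvHelperA (fuel : Nat) (reqs : List (List String)) (assignments : List String) (N : Int) :
    Option (Option (List String)) :=  -- none = IndexError, some none = Python None
  match fuel with
  | 0 => none
  | fuel + 1 =>
    if (assignments.length : Int) = N then some (some assignments)
    else
      match PySem.List.pyGet? reqs (assignments.length : Int) with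
      | none => none
      | some row => pvLoopA fuel reqs row assignments N
termination_by (fuel, 0)

def pvLoopA (fuel : Nat) (reqs : List (List String)) (row : List String)
    (assignments : List String) (N : Int) : Option (Option (List String)) :=
  match row with
  | [] => some none
  | city :: rest =>
    if city ∈ assignments then pvLoopA fuel reqs rest assignments N
    else
      -- A calls helper twice on success; the second (pure) call returns the same value
      match pvHelperA fuel reqs (assignments ++ [city]) N with
      | none => none
      | some none => pvLoopA fuel reqs rest assignments N
      | some (some r) => some (some r)
termination_by (fuel, row.length + 1)
end

def assign_cities (L : List (List String)) (N : Int) : Option (List String) :=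
  match pvHelperA (L.length + 1) L [] N with
  | none => none
  | some r => r

-- ===== PORT B =====
-- combos(rows): the Cartesian product of the rows, one tuple per branch, in row order
def pvCombosB (rows : List (List String)) : List (List String) :=
  match rows with
  | [] => [[]]
  | row :: rest => row.flatMap (fun city => (pvCombosB rest).map (fun tail => city :: tail))

def assign_cities_alt (L : List (List String)) (N : Int) : Option (List String) :=
  List.find? (fun combo => ((PySem.Set.ofList combo).length : Int) == N)
    (pvCombosB (PySem.List.slice L none (some N)))

-- ===== PRECONDITION & SPEC =====
-- Pre_ admits the natural domain 0 ≤ N ≤ len(L), plus inputs that provably dead-end before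
-- depth len(L) (an empty request row, or fewer distinct cities than rows), where A returns
-- None for any N; excluded are the remaining N outside [0, len(L)], where A's search can run
-- past the end of L and raise IndexError — on those excluded lists whose branches all happen
-- to dead-end anyway, A still returns None and B returns None there as well.
def Pre_assign_cities (L : List (List String)) (N : Int) : Prop :=
  (0 ≤ N ∧ N ≤ L.length) ∨ [] ∈ L ∨ (PySem.Set.ofList L.flatten).length < L.length
instance (L : List (List String)) (N : Int) : Decidable (Pre_assign_cities L N) := by
  unfold Pre_assign_cities; infer_instance

def pvWitness_assign_cities : List (List String) × Int := ([["a", "b"], ["a"]], 2)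

def Spec_assign_cities (L : List (List String)) (N : Int) (out : Option (List String)) : Prop := out = assign_cities_alt L N
instance (L : List (List String)) (N : Int) (out : Option (List String)) : Decidable (Spec_assign_cities L N out) := by unfold Spec_assign_cities; infer_instance

-- ===== CLAIM (what is proved, stated in full; the proofs are below) =====
def Claim_equal_assign_cities : Prop := ∀ (L : List (List String)) (N : Int), Dom_assign_cities L N → Pre_assign_cities L N → Spec_assign_cities L N (assign_cities L N)

-- ===== LEMMAS AND PROOFS =====

-- every tuple of the product has one element per row
theorem pvCombos_length (rows : List (List String)) (t : List String)
    (ht : t ∈ pvCombosB rows) : t.length = rows.length := by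
  induction rows generalizing t with
  | nil => simp [pvCombosB] at ht; simp [ht]
  | cons r rest ih =>
    simp only [pvCombosB, List.mem_flatMap, List.mem_map] at ht
    obtain ⟨c, _, u, hu, rfl⟩ := ht
    simp [ih u hu]

-- |set(t)| = |t| exactly on duplicate-free tuples
theorem pvOfList_len_iff (l : List String) :
    (PySem.Set.ofList l).length = l.length ↔ l.Nodup := by
  constructor
  · intro h
    induction l with
    | nil => simp
    | cons x xs ih =>
      rw [PySem.Set.ofList_cons x xs] at h
      by_cases hx : x ∈ xs
      · exfalso
        have h1 : ((PySem.Set.ofList xs).discard x).length < (PySem.Set.ofList xs).length := by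
          unfold PySem.Set.discard
          rw [List.length_filter_lt_length_iff_exists]
          exact ⟨x, by simp [PySem.Set.mem_ofList, hx], by simp⟩
        have h2 := PySem.Set.length_ofList_le xs
        simp only [List.length_cons] at h
        omega
      · have he : (PySem.Set.ofList xs).discard x = PySem.Set.ofList xs := by
          unfold PySem.Set.discard
          apply List.filter_eq_self.mpr
          intro a ha
          have hax : a ≠ x := fun e => hx (e ▸ (by simpa [PySem.Set.mem_ofList] using ha))
          simp [hax]
        rw [he] at h
        simp only [List.length_cons, Nat.add_left_inj] at h
        exact List.nodup_cons.mpr ⟨hx, ih h⟩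
  · intro h; rw [PySem.Set.ofList_eq_self_of_nodup l h]

-- find? only looks at the predicate on the list's members
theorem pvFind_congr {α : Type} (p q : α → Bool) (l : List α)
    (h : ∀ x ∈ l, p x = q x) : List.find? p l = List.find? q l := by
  induction l with
  | nil => rfl
  | cons x xs ih =>
    rw [List.find?_cons, List.find?_cons, h x List.mem_cons_self]
    cases q x
    · exact ih (fun y hy => h y (List.mem_cons_of_mem x hy))
    · rfl

theorem pvFind_dup (asg : List String) (c : String) (hc : c ∈ asg)
    (combos : List (List String)) :
    List.find? (fun t => decide ((asg ++ t).Nodup)) (combos.map (fun t => c :: t)) = none := by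
  rw [List.find?_eq_none]
  intro x hx
  simp only [List.mem_map] at hx
  obtain ⟨t, _, rfl⟩ := hx
  simp only [decide_eq_true_eq]
  intro hnd
  exact (List.disjoint_of_nodup_append hnd) hc (by simp)

theorem pvLoop_main (fuel : Nat) (L : List (List String)) (N : Int) (asg : List String)
    (combosRest : List (List String))
    (IH : ∀ c, c ∉ asg →
      pvHelperA fuel L (asg ++ [c]) N =
        some (Option.map ((asg ++ [c]) ++ ·)
          (List.find? (fun t => decide (((asg ++ [c]) ++ t).Nodup)) combosRest))) :
    ∀ row, pvLoopA fuel L row asg N =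
      some (Option.map (asg ++ ·)
        (List.find? (fun t => decide ((asg ++ t).Nodup))
          (row.flatMap (fun c => combosRest.map (fun t => c :: t))))) := by
  intro row
  induction row with
  | nil => simp [pvLoopA]
  | cons c rs ih =>
    rw [pvLoopA, List.flatMap_cons, List.find?_append]
    by_cases hc : c ∈ asg
    · rw [if_pos hc, pvFind_dup asg c hc combosRest, Option.none_or, ih]
    · rw [if_neg hc, IH c hc]
      have hfun : (fun t => decide ((asg ++ (c :: t)).Nodup)) =
          (fun t => decide (((asg ++ [c]) ++ t).Nodup)) := by
        funext t; rw [List.append_assoc]; rfl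
      have hmap : List.find? (fun t => decide ((asg ++ t).Nodup)) (combosRest.map (fun t => c :: t)) =
          Option.map (fun t => c :: t) (List.find? (fun t => decide (((asg ++ [c]) ++ t).Nodup)) combosRest) := by
        rw [List.find?_map]; rw [← hfun]; rfl
      rw [hmap]
      cases hf : List.find? (fun t => decide (((asg ++ [c]) ++ t).Nodup)) combosRest with
      | none => simpa using ih
      | some t => simp [List.append_assoc]


theorem pvMain (L : List (List String)) (N : Int) (n : Nat) (hn : (n : Int) = N)
    (hlen : n ≤ L.length) :
    ∀ (fuel : Nat) (asg : List String), asg.Nodup → asg.length ≤ n →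
      n - asg.length < fuel →
      pvHelperA fuel L asg N =
        some (Option.map (asg ++ ·)
          (List.find? (fun t => decide ((asg ++ t).Nodup))
            (pvCombosB ((L.drop asg.length).take (n - asg.length))))) := by
  intro fuel
  induction fuel with
  | zero => intro asg _ _ hf; omega
  | succ fuel ih =>
    intro asg hnd hle hf
    rw [pvHelperA]
    by_cases hk : asg.length = n
    · rw [if_pos (by rw [hk, hn])]
      simp [hk, pvCombosB, hnd]
    · have hklt : asg.length < n := by omega
      have hne : (asg.length : Int) ≠ N := by rw [← hn]; exact_mod_cast Nat.ne_of_lt hklt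
      rw [if_neg hne]
      have hL : asg.length < L.length := by omega
      rw [PySem.List.pyGet?_natCast, List.getElem?_eq_getElem hL]
      have hdrop : (L.drop asg.length).take (n - asg.length) =
          L[asg.length] :: ((L.drop (asg.length + 1)).take (n - (asg.length + 1))) := by
        rw [List.drop_eq_getElem_cons hL, List.take_cons (by omega)]
        congr 2
      rw [hdrop, pvCombosB]
      exact pvLoop_main fuel L N asg
        (pvCombosB ((L.drop (asg.length + 1)).take (n - (asg.length + 1))))
        (fun c hc => by
          have h := ih (asg ++ [c])
            (by simp [List.nodup_append, hnd]; exact fun a ha e => hc (e ▸ ha))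
            (by simp; omega) (by simp; omega)
          simpa using h) L[asg.length]

theorem pvNodup_length_le (l m : List String) (h : l.Nodup) (hs : l ⊆ m) :
    l.length ≤ m.length := by
  calc l.length = l.toFinset.card := (List.toFinset_card_of_nodup h).symm
    _ ≤ m.toFinset.card := Finset.card_le_card (by intro a ha; simp at ha ⊢; exact hs ha)
    _ ≤ m.length := m.toFinset_card_le

theorem pvLoop_dead (fuel : Nat) (L : List (List String)) (N : Int) (asg : List String) :
    ∀ row, (∀ c, c ∈ row → c ∉ asg → pvHelperA fuel L (asg ++ [c]) N = some none) →
      pvLoopA fuel L row asg N = some none := by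
  intro row
  induction row with
  | nil => intro _; simp [pvLoopA]
  | cons c rs ih =>
    intro IH
    rw [pvLoopA]
    by_cases hc : c ∈ asg
    · rw [if_pos hc]; exact ih (fun d hd => IH d (List.mem_cons_of_mem c hd))
    · rw [if_neg hc, IH c List.mem_cons_self hc]
      exact ih (fun d hd => IH d (List.mem_cons_of_mem c hd))

theorem pvDeadEnd (L : List (List String)) (N : Int)
    (hde : [] ∈ L ∨ (PySem.Set.ofList L.flatten).length < L.length)
    (hN : N < 0 ∨ (L.length : Int) < N) :
    ∀ (fuel : Nat) (asg : List String), asg.Nodup →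
      (∀ i (h : i < asg.length), ∃ (h2 : i < L.length), asg[i] ∈ L[i]) →
      L.length - asg.length < fuel →
      pvHelperA fuel L asg N = some none := by
  intro fuel
  induction fuel with
  | zero =>
    intro asg hnd hinv hf
    omega
  | succ fuel ih =>
    intro asg hnd hinv hf
    -- the search never reaches depth L.length
    have hlt : asg.length < L.length := by
      rcases hde with hemp | hcard
      · obtain ⟨j, hj, hje⟩ := List.mem_iff_getElem.mp hemp
        by_contra hge
        have hjlt : j < asg.length := by omega
        obtain ⟨h2, hm⟩ := hinv j hjlt
        rw [hje] at hm
        exact absurd hm (List.not_mem_nil)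
      · have hsub : asg ⊆ L.flatten := by
          intro a ha
          obtain ⟨i, hi, rfl⟩ := List.mem_iff_getElem.mp ha
          obtain ⟨h2, hm⟩ := hinv i hi
          exact List.mem_flatten.mpr ⟨L[i], List.getElem_mem h2, hm⟩
        have hsub2 : asg ⊆ PySem.Set.ofList L.flatten := by
          intro a ha; exact (PySem.Set.mem_ofList _ _).mpr (hsub ha)
        have := pvNodup_length_le asg (PySem.Set.ofList L.flatten) hnd hsub2
        omega
    rw [pvHelperA]
    have hne : (asg.length : Int) ≠ N := by
      rcases hN with h | h
      · omega
      · have : (asg.length : Int) < N := by exact_mod_cast lt_of_le_of_lt (by exact_mod_cast Nat.le_of_lt hlt) h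
        omega
    rw [if_neg hne, PySem.List.pyGet?_natCast, List.getElem?_eq_getElem hlt]
    apply pvLoop_dead fuel L N asg L[asg.length]
    intro c hcr hc
    apply ih (asg ++ [c])
      (by simp [List.nodup_append, hnd]; exact fun a ha e => hc (e ▸ ha))
      (by
        intro i hil
        simp only [List.length_append, List.length_cons, List.length_nil] at hil
        by_cases hi : i < asg.length
        · obtain ⟨h2, hm⟩ := hinv i hi
          exact ⟨h2, by rw [List.getElem_append_left hi]; exact hm⟩
        · have hieq : i = asg.length := by omega
          subst hieq
          exact ⟨hlt, by simpa using hcr⟩)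
      (by simp; omega)

theorem pvAltNone (L : List (List String)) (N : Int) (hN : N < 0 ∨ (L.length : Int) < N) :
    assign_cities_alt L N = none := by
  unfold assign_cities_alt
  rcases hN with h | h
  · rw [List.find?_eq_none]
    intro t _
    simp only [beq_iff_eq]
    intro he
    omega
  · have h0 : 0 ≤ N := le_trans (Int.natCast_nonneg _) (le_of_lt h)
    rw [PySem.List.slice_to L h0, List.take_of_length_le (by omega)]
    rw [List.find?_eq_none]
    intro t ht
    have h1 := pvCombos_length L t ht
    have h2 := PySem.Set.length_ofList_le t
    simp only [beq_iff_eq]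
    intro he
    omega

-- ===== VERDICT (by name: the statement is the Claim_ definition above) =====
theorem assign_cities_spec : Claim_equal_assign_cities := by
  intro L N _ hpre
  unfold Spec_assign_cities
  by_cases hr : 0 ≤ N ∧ N ≤ (L.length : Int)
  · -- the natural domain: A's backtracking finds the first all-distinct product tuple
    have hn : ((N.toNat : Int)) = N := Int.toNat_of_nonneg hr.1
    have hlen : N.toNat ≤ L.length := by omega
    have h := pvMain L N N.toNat hn hlen (L.length + 1) [] (by simp) (by simp) (by simp; omega)
    unfold assign_cities
    rw [h]
    unfold assign_cities_alt
    rw [← hn, PySem.List.slice_to_natCast]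
    simp only [List.drop_zero, List.nil_append, Nat.sub_zero, List.length_nil,
      Int.toNat_natCast]
    have hm : ∀ (o : Option (List String)), Option.map (fun x => x) o = o := by
      intro o; cases o <;> rfl
    rw [hm]
    apply pvFind_congr
    intro t ht
    have h1 := pvCombos_length (L.take N.toNat) t ht
    rw [List.length_take_of_le hlen] at h1
    rw [Bool.eq_iff_iff]
    simp only [decide_eq_true_eq, beq_iff_eq]
    rw [← pvOfList_len_iff, h1]
    omega
  · -- N out of range: Pre_ guarantees a dead end, both searches return None
    have hN : N < 0 ∨ (L.length : Int) < N := by omega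
    have hde : [] ∈ L ∨ (PySem.Set.ofList L.flatten).length < L.length := by
      rcases hpre with h | h | h
      · exact absurd h hr
      · exact Or.inl h
      · exact Or.inr h
    have h := pvDeadEnd L N hde hN (L.length + 1) [] (by simp) (by simp) (by simp)
    unfold assign_cities
    rw [h, pvAltNone L N hN]
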